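-- pv_equiv track=rewrite | github.com/mpmdean/krylov_example | hash_basis_methods.py | min_max_decode
-- ===== SOURCE A (Python) =====
-- def min_max_decode(shapes):
--     Ns = [N for N, _ in shapes]
--     totalN = sum(Ns)
--
--     b_min = 0
--     b_max = 0
--     running = totalN
--     for (N, M) in shapes:
--         running -= N
--         sub_min = (1 << M) - 1
--         sub_max = ((1 << M) - 1) << (N - M)
--         b_min |= sub_min << running
--         b_max |= sub_max << running
--
--     return b_min, b_max
-- ===== SOURCE B (Python) =====
-- def min_max_decode(shapes):
--     b_min = 0
--     b_max = 0
--     for N, M in shapes: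
--         sub = (1 << M) - 1
--         b_min = (b_min << N) + sub
--         b_max = (b_max << N) + (sub << (N - M))
--     return b_min, b_max
-- ===== Notes on version B (the rewrite author's own statement) =====
-- stated objective: simpler
-- what changed: Drops the Ns list, the totalN sum and the running suffix-offset bookkeeping: a single left-to-right Horner-style accumulation shifts the partial masks by each shape's width and adds the new sub-pattern, instead of OR-ing each sub-pattern into a precomputed absolute position.
import Mathlib
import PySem

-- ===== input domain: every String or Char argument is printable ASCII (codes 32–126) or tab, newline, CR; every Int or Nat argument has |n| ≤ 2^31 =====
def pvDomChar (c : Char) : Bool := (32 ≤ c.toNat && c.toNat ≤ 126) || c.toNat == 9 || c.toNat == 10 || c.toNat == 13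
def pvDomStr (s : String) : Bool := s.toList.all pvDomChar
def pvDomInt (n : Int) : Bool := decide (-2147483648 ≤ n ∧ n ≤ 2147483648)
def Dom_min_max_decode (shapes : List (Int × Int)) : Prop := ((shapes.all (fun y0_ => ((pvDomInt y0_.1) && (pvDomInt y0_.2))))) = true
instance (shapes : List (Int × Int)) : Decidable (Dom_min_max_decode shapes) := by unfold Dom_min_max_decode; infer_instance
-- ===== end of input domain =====

-- B replaces A's precomputed total width and absolute suffix offsets by a single
-- Horner-style accumulating pass (simpler: no Ns list, no totalN, no running counter).

-- ===== PORT A =====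
-- loop body of A; Python's '<<' ported as '<<<' on a .toNat exponent and '|' as
-- PySem.Int.bor — exact wherever the shift counts are nonnegative (Python raises
-- ValueError on a negative shift count; Pre_ excludes those inputs).
def pvAStep (st : Int × Int × Int) (p : Int × Int) : Int × Int × Int :=
  let running : Int := st.2.2 - p.1
  let sub_min : Int := (1 <<< p.2.toNat) - 1
  let sub_max : Int := ((1 <<< p.2.toNat) - 1) <<< (p.1 - p.2).toNat
  (PySem.Int.bor st.1 (sub_min <<< running.toNat),
   PySem.Int.bor st.2.1 (sub_max <<< running.toNat),
   running)

def min_max_decode (shapes : List (Int × Int)) : Int × Int :=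
  let Ns : List Int := shapes.map (fun p => p.1)
  let totalN : Int := Ns.sum
  let st := shapes.foldl pvAStep (0, 0, totalN)
  (st.1, st.2.1)

-- ===== PORT B =====
-- loop body of B: Horner accumulation (b << N) + sub
def pvBStep (st : Int × Int) (p : Int × Int) : Int × Int :=
  let sub : Int := (1 <<< p.2.toNat) - 1
  ((st.1 <<< p.1.toNat) + sub,
   (st.2 <<< p.1.toNat) + (sub <<< (p.1 - p.2).toNat))

def min_max_decode_alt (shapes : List (Int × Int)) : Int × Int :=
  shapes.foldl pvBStep (0, 0)

-- ===== PRECONDITION & SPEC =====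
-- Pre_ excludes exactly the inputs where Python A raises ValueError ('negative
-- shift count'): some shape with M < 0 or M > N.  (With 0 ≤ M ≤ N everywhere,
-- all shift counts, including the running suffix offset, are nonnegative.)
def Pre_min_max_decode (shapes : List (Int × Int)) : Prop :=
  ∀ p ∈ shapes, 0 ≤ p.2 ∧ p.2 ≤ p.1
instance (shapes : List (Int × Int)) : Decidable (Pre_min_max_decode shapes) := by
  unfold Pre_min_max_decode; infer_instance

def pvWitness_min_max_decode : (List (Int × Int)) := [(3, 2), (2, 1), (4, 0)]

def Spec_min_max_decode (shapes : List (Int × Int)) (out : Int × Int) : Prop := out = min_max_decode_alt shapes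
instance (shapes : List (Int × Int)) (out : Int × Int) : Decidable (Spec_min_max_decode shapes out) := by unfold Spec_min_max_decode; infer_instance

-- ===== CLAIM (what is proved, stated in full; the proofs are below) =====
def Claim_equal_min_max_decode : Prop := ∀ (shapes : List (Int × Int)), Dom_min_max_decode shapes → Pre_min_max_decode shapes → Spec_min_max_decode shapes (min_max_decode shapes)

-- ===== LEMMAS AND PROOFS =====

-- total bit width of the shapes, as a natural number
def pvSumN (shapes : List (Int × Int)) : ℕ := (shapes.map (fun p => p.1.toNat)).sum

-- the common natural-number value both folds compute
def pvPack (st : ℕ × ℕ) (p : Int × Int) : ℕ × ℕ :=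
  (st.1 <<< p.1.toNat + (2 ^ p.2.toNat - 1),
   st.2 <<< p.1.toNat + (2 ^ p.2.toNat - 1) <<< (p.1 - p.2).toNat)

-- OR of a shifted value with a small addend is addition (disjoint bit ranges)
theorem pv_lor_shl_add : ∀ (n : ℕ) (c s : ℕ), s < 2 ^ n → c <<< n ||| s = c <<< n + s := by
  intro n
  induction n with
  | zero =>
    intro c s h
    interval_cases s
    simp
  | succ n ih =>
    intro c s h
    have hs : s / 2 < 2 ^ n := by
      have : (2:ℕ) ^ (n+1) = 2 * 2 ^ n := by ring
      omega
    have h1 : c <<< (n+1) = Nat.bit false (c <<< n) := by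
      simp [Nat.bit, Nat.shiftLeft_eq, Nat.pow_succ]
      ring
    have h2 : Nat.bit (decide (s % 2 = 1)) (s / 2) = s := by
      simp [Nat.bit]
      rcases Nat.mod_two_eq_zero_or_one s with h' | h' <;> simp [h'] <;> omega
    calc c <<< (n+1) ||| s
        = Nat.bit false (c <<< n) ||| Nat.bit (decide (s % 2 = 1)) (s / 2) := by rw [h1, h2]
      _ = Nat.bit (false || decide (s % 2 = 1)) (c <<< n ||| s / 2) := Nat.lor_bit _ _ _ _
      _ = Nat.bit (decide (s % 2 = 1)) (c <<< n + s / 2) := by rw [ih c (s/2) hs]; simp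
      _ = c <<< (n+1) + s := by
        simp [Nat.bit, h1]
        rcases Nat.mod_two_eq_zero_or_one s with h' | h' <;> simp [h'] <;> omega

-- placing a sub-pattern s (< 2^n) next to x, then shifting both by T
theorem pv_or_shift (x s n T : ℕ) (hlt : s < 2 ^ n) :
    x <<< (n + T) ||| s <<< T = (x <<< n + s) <<< T := by
  rw [Nat.shiftLeft_add, ← Nat.shiftLeft_or_distrib, pv_lor_shl_add n x s hlt]

-- under Pre_, the Int sum of the Ns is the Nat sum
theorem pv_sum_eq (shapes : List (Int × Int)) (h : Pre_min_max_decode shapes) :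
    (shapes.map (fun p => p.1)).sum = (pvSumN shapes : Int) := by
  induction shapes with
  | nil => simp [pvSumN]
  | cons p t ih =>
    have hp := h p (List.mem_cons_self ..)
    have ht : Pre_min_max_decode t := fun q hq => h q (List.mem_cons_of_mem _ hq)
    rw [List.map_cons, List.sum_cons, ih ht]
    simp [pvSumN]
    omega

-- B's fold computes pvPack, componentwise, over any natural start state
theorem pv_B_fold : ∀ (shapes : List (Int × Int)) (a b : ℕ),
    shapes.foldl pvBStep ((a : Int), (b : Int)) =
      (((shapes.foldl pvPack (a, b)).1 : Int), ((shapes.foldl pvPack (a, b)).2 : Int)) := by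
  intro shapes
  induction shapes with
  | nil => intro a b; simp
  | cons p t ih =>
    intro a b
    have step : pvBStep ((a : Int), (b : Int)) p =
        (((pvPack (a, b) p).1 : Int), ((pvPack (a, b) p).2 : Int)) := by
      simp only [pvBStep, pvPack, Prod.mk.injEq]
      constructor <;> simp [Int.shiftLeft_eq, Nat.shiftLeft_eq]
    simp only [List.foldl_cons, step, ih]

-- A's fold from state (a <<< T, b <<< T, T), T the total remaining width,
-- lands on pvPack's result with offset 0
theorem pv_A_fold : ∀ (shapes : List (Int × Int)) (a b : ℕ), Pre_min_max_decode shapes →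
    shapes.foldl pvAStep (((a : Int)) <<< pvSumN shapes, ((b : Int)) <<< pvSumN shapes, (pvSumN shapes : Int)) =
      (((shapes.foldl pvPack (a, b)).1 : Int), ((shapes.foldl pvPack (a, b)).2 : Int), 0) := by
  intro shapes
  induction shapes with
  | nil =>
    intro a b _
    simp [pvSumN]
  | cons p t ih =>
    intro a b h
    have hp := h p (List.mem_cons_self ..)
    have ht : Pre_min_max_decode t := fun q hq => h q (List.mem_cons_of_mem _ hq)
    set N : ℕ := p.1.toNat with hN
    set M : ℕ := p.2.toNat with hM
    have hMN : M ≤ N := by omega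
    have hT : pvSumN (p :: t) = N + pvSumN t := by simp [pvSumN, hN]
    have hrun : ((pvSumN (p :: t) : Int)) - p.1 = (pvSumN t : Int) := by
      rw [hT]; push_cast; omega
    have hsubNM : (p.1 - p.2).toNat = N - M := by omega
    have hone : 1 ≤ 2 ^ M := Nat.one_le_two_pow
    have hmin_lt : 2 ^ M - 1 < 2 ^ N := by
      have := Nat.pow_le_pow_right (by norm_num : 1 ≤ 2) hMN
      omega
    have hmax_lt : (2 ^ M - 1) <<< (N - M) < 2 ^ N := by
      rw [Nat.shiftLeft_eq]
      have h2 := Nat.two_pow_pos (N - M)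
      have h3 : (2 ^ M - 1) * 2 ^ (N - M) < 2 ^ M * 2 ^ (N - M) :=
        Nat.mul_lt_mul_of_lt_of_le (by omega) (Nat.le_refl _) h2
      have h4 : 2 ^ M * 2 ^ (N - M) = 2 ^ N := by
        rw [← Nat.pow_add]; congr 1; omega
      omega
    -- one step of A equals one step of pvPack, still shifted by pvSumN t
    have h2M : (1 <<< M : ℕ) = 2 ^ M := by rw [Nat.shiftLeft_eq]; ring
    have hrun' : ((N + pvSumN t : ℕ) : Int) - p.1 = ((pvSumN t : ℕ) : Int) := by
      rw [← hT]; exact hrun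
    have step : pvAStep (((a : Int)) <<< pvSumN (p :: t), ((b : Int)) <<< pvSumN (p :: t), (pvSumN (p :: t) : Int)) p =
        (((pvPack (a, b) p).1 : Int) <<< pvSumN t, ((pvPack (a, b) p).2 : Int) <<< pvSumN t, (pvSumN t : Int)) := by
      simp only [pvAStep, pvPack, hsubNM, ← hM, ← hN, Prod.mk.injEq, hT, hrun', Int.toNat_natCast, h2M]
      refine ⟨?_, ?_, by trivial⟩
      · rw [show ((2 ^ M : ℕ) : Int) - 1 = ((2 ^ M - 1 : ℕ) : Int) by push_cast [hone]; ring]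
        rw [← Int.natCast_shiftLeft, ← Int.natCast_shiftLeft, PySem.Int.bor_natCast, ← Int.natCast_shiftLeft]
        congr 1
        exact pv_or_shift a (2 ^ M - 1) N (pvSumN t) hmin_lt
      · rw [← Int.natCast_shiftLeft, ← Int.natCast_shiftLeft, PySem.Int.bor_natCast, ← Int.natCast_shiftLeft]
        congr 1
        exact pv_or_shift b ((2 ^ M - 1) <<< (N - M)) N (pvSumN t) hmax_lt
    simp only [List.foldl_cons, step, ih _ _ ht]

-- ===== VERDICT (by name: the statement is the Claim_ definition above) =====
theorem min_max_decode_spec : Claim_equal_min_max_decode := by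
  intro shapes _ hpre
  unfold Spec_min_max_decode
  simp only [min_max_decode, min_max_decode_alt]
  rw [pv_sum_eq shapes hpre]
  have h := pv_A_fold shapes 0 0 hpre
  have hb := pv_B_fold shapes 0 0
  simp only [Nat.cast_zero, Int.zero_shiftLeft] at h hb
  rw [h, hb]
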